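-- pv_equiv track=rewrite | github.com/CitationStyleClassification/CitationStyleClassification | python/create_csv.py | years
-- ===== SOURCE A (Python) =====
-- def years(s):
--     # подсчитываем количество чисел, похожих на год
--     cnt = 0
--     for i in range(50, 99):
--         if str(i) in s:
--             cnt += 1
--     for i in range(1950, 2022):
--         if str(i) in s:
--             cnt += 1
--     return cnt
-- ===== SOURCE B (Python) =====
-- def years(s):
--     # single scan over positions with prebuilt target sets; counts distinct matches
--     targets2 = {str(i) for i in range(50, 99)}
--     targets4 = {str(i) for i in range(1950, 2022)}
--     found = set()
--     for i in range(len(s)):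
--         c2 = s[i:i+2]
--         if c2 in targets2:
--             found.add(c2)
--         c4 = s[i:i+4]
--         if c4 in targets4:
--             found.add(c4)
--     return len(found)
-- ===== Notes on version B (the rewrite author's own statement) =====
-- stated objective: alternative
-- what changed: Instead of scanning s once per each of the 121 year patterns, B scans s's positions once, testing the 2- and 4-char substring at each position against two prebuilt target sets and counting the distinct patterns found.
import Mathlib
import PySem

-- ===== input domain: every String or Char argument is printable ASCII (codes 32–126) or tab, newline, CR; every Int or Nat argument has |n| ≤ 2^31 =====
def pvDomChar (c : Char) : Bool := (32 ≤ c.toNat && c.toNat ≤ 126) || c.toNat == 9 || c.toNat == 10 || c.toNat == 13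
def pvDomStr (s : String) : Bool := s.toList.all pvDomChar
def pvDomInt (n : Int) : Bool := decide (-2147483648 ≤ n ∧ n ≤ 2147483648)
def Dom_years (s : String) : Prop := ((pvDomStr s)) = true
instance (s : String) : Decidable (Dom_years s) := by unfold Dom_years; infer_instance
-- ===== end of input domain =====

set_option maxRecDepth 8000

-- B scans the text once against prebuilt sets of year patterns instead of scanning the text once per pattern (objective: alternative algorithm).

-- ===== PORT A =====
def years (s : String) : Int :=
  let cnt : Int := 0
  let cnt := (PySem.List.pyRange 50 99 1).foldl
    (fun cnt i => if PySem.Str.isIn (PySem.Int.toStr i) s then cnt + 1 else cnt) cnt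
  let cnt := (PySem.List.pyRange 1950 2022 1).foldl
    (fun cnt i => if PySem.Str.isIn (PySem.Int.toStr i) s then cnt + 1 else cnt) cnt
  cnt

-- ===== PORT B =====
def years_alt (s : String) : Int :=
  let targets2 : PySem.Set String :=
    PySem.Set.ofList ((PySem.List.pyRange 50 99 1).map PySem.Int.toStr)
  let targets4 : PySem.Set String :=
    PySem.Set.ofList ((PySem.List.pyRange 1950 2022 1).map PySem.Int.toStr)
  let found : PySem.Set String :=
    (PySem.List.pyRange 0 (PySem.Str.len s) 1).foldl
      (fun found i =>
        let c2 := PySem.Str.slice s (some i) (some (i + 2))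
        let found := if PySem.Set.contains targets2 c2 then PySem.Set.add found c2 else found
        let c4 := PySem.Str.slice s (some i) (some (i + 4))
        if PySem.Set.contains targets4 c4 then PySem.Set.add found c4 else found)
      PySem.Set.empty
  PySem.Set.len found

-- ===== PRECONDITION & SPEC =====
def Spec_years (s : String) (out : Int) : Prop := out = years_alt s
instance (s : String) (out : Int) : Decidable (Spec_years s out) := by unfold Spec_years; infer_instance

-- ===== CLAIM (what is proved, stated in full; the proofs are below) =====
def Claim_equal_years : Prop := ∀ (s : String), Dom_years s → Spec_years s (years s)

-- ===== LEMMAS AND PROOFS =====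

-- the two target pattern lists
def pvT2 : List String := (PySem.List.pyRange 50 99 1).map PySem.Int.toStr
def pvT4 : List String := (PySem.List.pyRange 1950 2022 1).map PySem.Int.toStr

set_option maxRecDepth 4000 in
lemma pvT2_len : ∀ t ∈ pvT2, t.toList.length = 2 := by decide
set_option maxRecDepth 4000 in
lemma pvT4_len : ∀ t ∈ pvT4, t.toList.length = 4 := by decide
set_option maxRecDepth 4000 in
lemma pvT_nodup : (pvT2 ++ pvT4).Nodup := by decide

-- A's counting loop is countP
lemma foldl_count (q : Int → Bool) (l : List Int) (a : Int) :
    l.foldl (fun c i => if q i then c + 1 else c) a = a + (l.countP q : Int) := by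
  induction l generalizing a with
  | nil => simp
  | cons x xs ih =>
    simp only [List.foldl_cons, List.countP_cons, ih]
    by_cases h : q x <;> simp [h] <;> ring

-- substring test ⟷ some position's slice equals the pattern
lemma isIn_iff_exists_slice (s t : String) (L : Nat) (hL : 0 < L)
    (ht : t.toList.length = L) :
    PySem.Str.isIn t s = true ↔
      ∃ i : Int, 0 ≤ i ∧ i < (s.toList.length : Int) ∧
        PySem.Str.slice s (some i) (some (i + L)) = t := by
  rw [PySem.Str.isIn_iff_infix]
  constructor
  · rintro ⟨pre, suf, hps⟩
    refine ⟨(pre.length : Int), by positivity, ?_, ?_⟩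
    · have : pre.length + L ≤ s.toList.length := by
        rw [← hps]; simp [ht]
      omega
    · apply String.toList_inj.mp
      rw [PySem.Str.toList_slice, PySem.Chars.slice_eq_listSlice,
        PySem.List.slice_toNat _ (by positivity) (by positivity)]
      have h1 : ((pre.length : Int) + L).toNat - (pre.length : Int).toNat = L := by omega
      rw [h1]
      have h2 : (pre.length : Int).toNat = pre.length := by omega
      rw [h2, ← hps, List.append_assoc, List.drop_left]
      exact List.take_left' ht
  · rintro ⟨i, hi0, hilt, hsl⟩
    have : t.toList = ((s.toList.drop i.toNat).take ((i + L).toNat - i.toNat)) := by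
      rw [← hsl, PySem.Str.toList_slice, PySem.Chars.slice_eq_listSlice,
        PySem.List.slice_toNat _ hi0 (by omega)]
    rw [this]
    exact (List.take_prefix _ _).isInfix.trans (List.drop_suffix _ _).isInfix

-- the body of B's scan loop
def pvStep (t2 t4 : PySem.Set String) (s : String) (found : PySem.Set String) (i : Int) : PySem.Set String :=
  let c2 := PySem.Str.slice s (some i) (some (i + 2))
  let found := if PySem.Set.contains t2 c2 then PySem.Set.add found c2 else found
  let c4 := PySem.Str.slice s (some i) (some (i + 4))
  if PySem.Set.contains t4 c4 then PySem.Set.add found c4 else found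

lemma years_alt_eq (s : String) :
    years_alt s =
      PySem.Set.len ((PySem.List.pyRange 0 (PySem.Str.len s) 1).foldl
        (pvStep (PySem.Set.ofList pvT2) (PySem.Set.ofList pvT4) s) PySem.Set.empty) := rfl

lemma nodup_foldl_step (t2 t4 : PySem.Set String) (s : String) (l : List Int) (acc : PySem.Set String)
    (h : acc.Nodup) : (l.foldl (pvStep t2 t4 s) acc).Nodup := by
  induction l generalizing acc with
  | nil => exact h
  | cons x xs ih =>
    apply ih
    simp only [pvStep]
    split_ifs <;> first
      | exact PySem.Set.nodup_add _ _ (PySem.Set.nodup_add _ _ h)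
      | exact PySem.Set.nodup_add _ _ h
      | exact h

lemma mem_foldl_step (t2 t4 : PySem.Set String) (s : String) (l : List Int) (acc : PySem.Set String) (x : String) :
    x ∈ l.foldl (pvStep t2 t4 s) acc ↔
      x ∈ acc ∨ ∃ i ∈ l,
        (PySem.Set.contains t2 (PySem.Str.slice s (some i) (some (i + 2))) = true ∧
          x = PySem.Str.slice s (some i) (some (i + 2))) ∨
        (PySem.Set.contains t4 (PySem.Str.slice s (some i) (some (i + 4))) = true ∧
          x = PySem.Str.slice s (some i) (some (i + 4))) := by
  induction l generalizing acc with
  | nil => simp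
  | cons j xs ih =>
    rw [List.foldl_cons, ih]
    have hstep : x ∈ pvStep t2 t4 s acc j ↔ x ∈ acc ∨
        (PySem.Set.contains t2 (PySem.Str.slice s (some j) (some (j + 2))) = true ∧
          x = PySem.Str.slice s (some j) (some (j + 2))) ∨
        (PySem.Set.contains t4 (PySem.Str.slice s (some j) (some (j + 4))) = true ∧
          x = PySem.Str.slice s (some j) (some (j + 4))) := by
      simp only [pvStep]
      split_ifs with h2 h4 h4 <;>
        simp only [PySem.Set.contains_eq_listContains, List.contains_iff_mem] at h2 h4 <;>
        simp [PySem.Set.mem_add, h2, h4] <;> tauto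
    rw [hstep]
    simp only [List.exists_mem_cons_iff]
    rw [or_assoc]

-- membership in the found set = pattern that occurs in s
lemma mem_found_iff (s : String) (x : String) :
    x ∈ (PySem.List.pyRange 0 (PySem.Str.len s) 1).foldl
        (pvStep (PySem.Set.ofList pvT2) (PySem.Set.ofList pvT4) s) PySem.Set.empty ↔
      x ∈ (pvT2 ++ pvT4).filter (fun t => PySem.Str.isIn t s) := by
  rw [mem_foldl_step, List.mem_filter, List.mem_append]
  simp only [PySem.Set.contains_eq_listContains, List.contains_iff_mem,
    PySem.Set.mem_ofList, PySem.List.mem_pyRange_one, PySem.Str.len_eq,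
    PySem.Set.empty, List.not_mem_nil, false_or]
  constructor
  · rintro ⟨i, ⟨hi0, hilt⟩, (⟨hm, rfl⟩ | ⟨hm, rfl⟩)⟩
    · exact ⟨Or.inl hm, (isIn_iff_exists_slice s _ 2 (by omega) (pvT2_len _ hm)).mpr
        ⟨i, hi0, hilt, rfl⟩⟩
    · exact ⟨Or.inr hm, (isIn_iff_exists_slice s _ 4 (by omega) (pvT4_len _ hm)).mpr
        ⟨i, hi0, hilt, rfl⟩⟩
  · rintro ⟨hm | hm, hin⟩
    · obtain ⟨i, hi0, hilt, hsl⟩ :=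
        (isIn_iff_exists_slice s x 2 (by omega) (pvT2_len _ hm)).mp hin
      push_cast at hsl
      exact ⟨i, ⟨hi0, hilt⟩, Or.inl ⟨by rw [hsl]; exact hm, hsl.symm⟩⟩
    · obtain ⟨i, hi0, hilt, hsl⟩ :=
        (isIn_iff_exists_slice s x 4 (by omega) (pvT4_len _ hm)).mp hin
      push_cast at hsl
      exact ⟨i, ⟨hi0, hilt⟩, Or.inr ⟨by rw [hsl]; exact hm, hsl.symm⟩⟩

lemma years_eq_countP (s : String) :
    years s = (((pvT2 ++ pvT4).countP (fun t => PySem.Str.isIn t s) : Nat) : Int) := by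
  simp only [years]
  rw [foldl_count, foldl_count, List.countP_append]
  unfold pvT2 pvT4
  rw [List.countP_map, List.countP_map]
  push_cast
  simp only [Function.comp_def]
  simp

-- ===== VERDICT (by name: the statement is the Claim_ definition above) =====
theorem years_spec : Claim_equal_years := by
  intro s _
  show years s = years_alt s
  rw [years_eq_countP, years_alt_eq]
  have hperm : ((PySem.List.pyRange 0 (PySem.Str.len s) 1).foldl
      (pvStep (PySem.Set.ofList pvT2) (PySem.Set.ofList pvT4) s) PySem.Set.empty).Perm
      ((pvT2 ++ pvT4).filter (fun t => PySem.Str.isIn t s)) :=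
    (List.perm_ext_iff_of_nodup
      (nodup_foldl_step _ _ s _ _ (by simp [PySem.Set.empty]))
      (pvT_nodup.filter _)).mpr (mem_found_iff s)
  rw [List.countP_eq_length_filter, ← hperm.length_eq]
  simp [PySem.Set.len]
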